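-- pv_equiv track=rewrite | github.com/anemenman/py-puzz-cr | puzz_001/pz018_white_black_list.py | check
-- ===== SOURCE A (Python) =====
-- white = ['white']
--
-- black = ['a', 'b', 'c']
--
-- def check(text):
--     in_white = False
--
--     for word in text.split():
--         if word in black:
--             return 'Error'
--         if word in white:
--             in_white = True
--     if in_white:
--         return 'Ok'
--     return 'Error'
-- ===== SOURCE B (Python) =====
-- SCORE = {'a': 2, 'b': 2, 'c': 2, 'white': 1}
--
-- def check(text):
--     level = max((SCORE.get(w, 0) for w in text.split()), default=0)
--     return 'Ok' if level == 1 else 'Error'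
-- ===== Notes on version B (the rewrite author's own statement) =====
-- stated objective: alternative
-- what changed: Replaces A's early-returning loop with a flag by a table-driven max-reduction: each word is scored via a dict (black=2, white=1, other=0), the maximum score is taken, and the verdict is read off arithmetically (1 -> Ok, else Error).
import Mathlib
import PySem

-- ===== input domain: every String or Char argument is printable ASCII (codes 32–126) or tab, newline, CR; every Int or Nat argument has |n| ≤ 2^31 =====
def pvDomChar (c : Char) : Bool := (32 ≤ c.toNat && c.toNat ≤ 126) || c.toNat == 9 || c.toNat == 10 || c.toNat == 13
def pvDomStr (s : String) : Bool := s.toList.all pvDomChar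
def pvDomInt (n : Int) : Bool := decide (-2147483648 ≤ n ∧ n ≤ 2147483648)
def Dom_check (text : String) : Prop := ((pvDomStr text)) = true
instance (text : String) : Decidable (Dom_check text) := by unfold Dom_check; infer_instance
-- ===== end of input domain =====

-- ===== PORT A =====
-- B replaces A's early-returning loop with a table-driven max-reduction of word
-- scores (black=2, white=1, other=0) read off arithmetically (objective: alternative).
def checkWhite : List String := ["white"]
def checkBlack : List String := ["a", "b", "c"]

-- A's for-loop: state = in_white flag; early return on a black word
def checkGo : List String → Bool → String
  | [], inWhite => if inWhite then "Ok" else "Error"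
  | w :: ws, inWhite =>
    if checkBlack.contains w then "Error"
    else checkGo ws (if checkWhite.contains w then true else inWhite)

def check (text : String) : String :=
  checkGo (PySem.Str.split₀ text) false

-- ===== PORT B =====
def checkSCORE : PySem.Dict String Int :=
  PySem.Dict.ofList [("a", 2), ("b", 2), ("c", 2), ("white", 1)]

def check_alt (text : String) : String :=
  let level : Int :=
    ((PySem.Str.split₀ text).map (fun w => checkSCORE.getD w 0)).foldl max 0
  if level = 1 then "Ok" else "Error"

-- ===== PRECONDITION & SPEC =====
def Spec_check (text : String) (out : String) : Prop := out = check_alt text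
instance (text : String) (out : String) : Decidable (Spec_check text out) := by unfold Spec_check; infer_instance

-- ===== CLAIM =====
def Claim_equal_check : Prop := ∀ (text : String), Dom_check text → Spec_check text (check text)

-- ===== LEMMAS AND PROOFS =====

def checkScore (w : String) : Int := checkSCORE.getD w 0

lemma checkScore_eq (w : String) :
    checkScore w = if w = "a" ∨ w = "b" ∨ w = "c" then 2 else if w = "white" then 1 else 0 := by
  have h : checkSCORE =
      (((PySem.Dict.empty.insert "a" (2 : Int)).insert "b" 2).insert "c" 2).insert "white" 1 := by
    decide
  unfold checkScore
  rw [h]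
  simp only [PySem.Dict.getD_insert, PySem.Dict.getD_empty]
  split_ifs <;> simp_all

lemma contains_black (w : String) :
    checkBlack.contains w = true ↔ (w = "a" ∨ w = "b" ∨ w = "c") := by
  simp [checkBlack]

lemma contains_white (w : String) :
    checkWhite.contains w = true ↔ w = "white" := by
  simp [checkWhite]

lemma foldl_max_two (l : List Int) (h : ∀ x ∈ l, x ≤ 2) :
    l.foldl max (2 : Int) = 2 := by
  induction l with
  | nil => rfl
  | cons x xs ih =>
    have hx : x ≤ 2 := h x (List.mem_cons_self ..)
    simp only [List.foldl_cons, max_eq_left hx]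
    exact ih (fun y hy => h y (List.mem_cons_of_mem _ hy))

lemma score_foldl_max_two (ws : List String) :
    (ws.map checkScore).foldl max (2 : Int) = 2 := by
  apply foldl_max_two
  intro x hx
  obtain ⟨w, _, rfl⟩ := List.mem_map.mp hx
  rw [checkScore_eq]
  split_ifs <;> omega

-- Main invariant: A's loop on remaining words ws with flag inWhite agrees with
-- rendering the max of the accumulated score and the scores of ws.
lemma checkGo_eq_render (ws : List String) (inWhite : Bool) :
    checkGo ws inWhite =
      (if (ws.map checkScore).foldl max (if inWhite then 1 else 0) = 1 then "Ok" else "Error") := by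
  induction ws generalizing inWhite with
  | nil => cases inWhite <;> simp [checkGo]
  | cons w rest ih =>
    cases hb : checkBlack.contains w with
    | true =>
      have hs : checkScore w = 2 := by
        rw [checkScore_eq, if_pos ((contains_black w).mp hb)]
      have hmax : max (if inWhite then (1 : Int) else 0) (checkScore w) = 2 := by
        rw [hs]; cases inWhite <;> simp
      simp only [checkGo, hb, if_true, List.map_cons, List.foldl_cons, hmax,
        score_foldl_max_two]
      norm_num
    | false =>
      cases hw : checkWhite.contains w with
      | true =>
        have hs : checkScore w = 1 := by
          have h4 : w = "white" := (contains_white w).mp hw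
          have : ¬ (w = "a" ∨ w = "b" ∨ w = "c") := by
            intro h; exact absurd ((contains_black w).mpr h) (by rw [hb]; simp)
          rw [checkScore_eq, if_neg this, if_pos h4]
        have hmax : max (if inWhite then (1 : Int) else 0) (checkScore w) = 1 := by
          rw [hs]; cases inWhite <;> simp
        simp only [checkGo, hb, hw, Bool.false_eq_true, if_false, if_true,
          List.map_cons, List.foldl_cons, hmax]
        simpa using ih true
      | false =>
        have hs : checkScore w = 0 := by
          have h1 : ¬ (w = "a" ∨ w = "b" ∨ w = "c") := by
            intro h; exact absurd ((contains_black w).mpr h) (by rw [hb]; simp)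
          have h2 : ¬ w = "white" := by
            intro h; exact absurd ((contains_white w).mpr h) (by rw [hw]; simp)
          rw [checkScore_eq, if_neg h1, if_neg h2]
        have hmax : max (if inWhite then (1 : Int) else 0) (checkScore w)
            = (if inWhite then 1 else 0) := by
          rw [hs]; cases inWhite <;> simp
        simp only [checkGo, hb, hw, Bool.false_eq_true, if_false,
          List.map_cons, List.foldl_cons, hmax]
        exact ih inWhite

-- ===== VERDICT =====
theorem check_spec : Claim_equal_check := by
  intro text _
  simp only [Spec_check, check, check_alt, checkGo_eq_render]
  rfl
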